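-- pv_equiv track=rewrite | github.com/isaureCdB/Scripts | parse_bioassemblies.py | parseOperationExpression
-- ===== SOURCE A (Python) =====
-- def parseOperationExpression(expression):
--     operations = []
--     if expression.find(",") > -1:
--         # comma-separated list of expressions
--         sub_expressions = expression.split(",")
--         for sub_expression in sub_expressions:
--             operations += parseOperationExpression(sub_expression)
--     elif expression.find("-") > -1:
--         # range
--         start, end = expression.split("-")
--         start = int(start)
--         end = int(end)
--         for n in range(start, end + 1):
--             operations.append(str(n))
--     else:
--         # single operation
--         operations = [expression]
--     return operations
-- ===== SOURCE B (Python) =====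
-- def parseOperationExpression(expression):
--     operations = []
--     for part in expression.split(","):
--         if "-" in part:
--             start, end = part.split("-")
--             operations += [str(n) for n in range(int(start), int(end) + 1)]
--         else:
--             operations.append(part)
--     return operations
-- ===== Notes on version B (the rewrite author's own statement) =====
-- stated objective: simpler
-- what changed: Replaced A's recursion over comma-separated sub-expressions (and its per-element append loop for ranges) by a single iterative loop over the comma-split parts with a list-comprehension for the range branch.
import Mathlib
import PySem

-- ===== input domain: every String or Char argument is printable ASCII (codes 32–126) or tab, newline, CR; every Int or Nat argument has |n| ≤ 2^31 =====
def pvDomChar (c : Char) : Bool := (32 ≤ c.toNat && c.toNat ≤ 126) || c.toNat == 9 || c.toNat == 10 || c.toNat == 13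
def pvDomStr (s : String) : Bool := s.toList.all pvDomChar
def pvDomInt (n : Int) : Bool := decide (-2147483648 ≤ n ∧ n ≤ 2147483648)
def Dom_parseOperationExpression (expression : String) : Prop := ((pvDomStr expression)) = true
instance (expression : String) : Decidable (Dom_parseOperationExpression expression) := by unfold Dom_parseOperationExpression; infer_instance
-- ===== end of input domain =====

-- B replaces A's recursion on comma sub-expressions by one iterative loop over the comma-split parts (objective: simpler); same return value on all of Pre_.

-- ===== PORT A =====
-- A recurses on the comma-split pieces; fuel = length + 1 makes the
-- recursion structural (the fuel-0 branch is never reached on Pre_ inputs).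
def parseOpAux : Nat → List Char → List (List Char)
  | 0, _ => []
  | fuel + 1, e =>
    if PySem.Chars.find e [','] > -1 then
      -- comma-separated list of expressions
      (PySem.Chars.splitOn e [',']).foldl (fun ops sub => ops ++ parseOpAux fuel sub) []
    else if PySem.Chars.find e ['-'] > -1 then
      -- range
      match PySem.Chars.splitOn e ['-'] with
      | [s, t] =>
        match PySem.Int.ofChars? s, PySem.Int.ofChars? t with
        | some st, some en =>
          (PySem.List.pyRange st (en + 1) 1).foldl (fun ops n => ops ++ [PySem.Int.toChars n]) []
        | _, _ => []   -- int() raises ValueError here: excluded by Pre_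
      | _ => []        -- unpacking 'start, end' raises ValueError here: excluded by Pre_
    else
      -- single operation
      [e]

def parseOperationExpression (expression : String) : List String :=
  (parseOpAux (expression.toList.length + 1) expression.toList).map String.ofList

-- ===== PORT B =====
def parsePartB (ops : List (List Char)) (part : List Char) : List (List Char) :=
  if PySem.Chars.isIn ['-'] part then
    match PySem.Chars.splitOn part ['-'] with
    | [s, t] =>
      match PySem.Int.ofChars? s, PySem.Int.ofChars? t with
      | some st, some en => ops ++ (PySem.List.pyRange st (en + 1) 1).map PySem.Int.toChars
      | _, _ => ops    -- int() raises ValueError here: excluded by Pre_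
    | _ => ops         -- unpacking raises ValueError here: excluded by Pre_
  else ops ++ [part]

def parseOperationExpression_alt (expression : String) : List String :=
  ((PySem.Chars.splitOn expression.toList [',']).foldl parsePartB []).map String.ofList

-- ===== PRECONDITION & SPEC =====
-- Pre_ excludes exactly the inputs on which the Python A raises ValueError (a part
-- containing '-' that does not split into exactly two int()-parseable pieces); A
-- returns normally on every other input, and B raises on the same inputs.
def pvPartOK (p : List Char) : Bool :=
  if PySem.Chars.isIn ['-'] p then
    match PySem.Chars.splitOn p ['-'] with
    | [s, t] => (PySem.Int.ofChars? s).isSome && (PySem.Int.ofChars? t).isSome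
    | _ => false
  else true

def Pre_parseOperationExpression (expression : String) : Prop :=
  (PySem.Chars.splitOn expression.toList [',']).all pvPartOK = true

instance (expression : String) : Decidable (Pre_parseOperationExpression expression) := by
  unfold Pre_parseOperationExpression; infer_instance

def pvWitness_parseOperationExpression : String := "1-3,7"

def Spec_parseOperationExpression (expression : String) (out : List String) : Prop :=
  out = parseOperationExpression_alt expression
instance (expression : String) (out : List String) : Decidable (Spec_parseOperationExpression expression out) := by
  unfold Spec_parseOperationExpression; infer_instance

-- ===== CLAIM (what is proved, stated in full; the proofs are below) =====
def Claim_equal_parseOperationExpression : Prop := ∀ (expression : String), Dom_parseOperationExpression expression → Pre_parseOperationExpression expression → Spec_parseOperationExpression expression (parseOperationExpression expression)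

-- ===== LEMMAS AND PROOFS =====

-- A simple structural model of splitting on a single character.
def pvConsHead (p : List Char) : List (List Char) → List (List Char)
  | [] => [p]
  | q :: qs => (p ++ q) :: qs

def pvCharSplit (c : Char) : List Char → List (List Char)
  | [] => [[]]
  | a :: t => if a = c then [] :: pvCharSplit c t else pvConsHead [a] (pvCharSplit c t)

theorem pvCharSplit_ne_nil (c : Char) (l : List Char) : pvCharSplit c l ≠ [] := by
  induction l with
  | nil => simp [pvCharSplit]
  | cons a t ih =>
    simp only [pvCharSplit]
    split_ifs
    · simp
    · cases h : pvCharSplit c t <;> simp [pvConsHead]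

theorem pvConsHead_nil {X : List (List Char)} (h : X ≠ []) : pvConsHead [] X = X := by
  cases X with
  | nil => exact absurd rfl h
  | cons q qs => simp [pvConsHead]

theorem pvConsHead_consHead (p q : List Char) (X : List (List Char)) :
    pvConsHead p (pvConsHead q X) = pvConsHead (p ++ q) X := by
  cases X <;> simp [pvConsHead]

theorem pvCharSplit_cons_self (c : Char) (t : List Char) :
    pvCharSplit c (c :: t) = [] :: pvCharSplit c t := by
  simp [pvCharSplit]

theorem pvCharSplit_cons_ne (c a : Char) (t : List Char) (h : ¬ a = c) :
    pvCharSplit c (a :: t) = pvConsHead [a] (pvCharSplit c t) := by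
  simp [pvCharSplit, h]

theorem pvGo (c : Char) : ∀ (fuel : Nat) (l cur : List Char) (acc : List (List Char)),
    l.length < fuel →
    PySem.Chars.splitOn.go [c] fuel l cur acc = acc.reverse ++ pvConsHead cur.reverse (pvCharSplit c l) := by
  intro fuel
  induction fuel with
  | zero => intro l cur acc h; omega
  | succ f ih =>
    intro l cur acc h
    cases l with
    | nil => simp [PySem.Chars.splitOn.go, pvCharSplit, pvConsHead]
    | cons a rest =>
      simp only [PySem.Chars.splitOn.go]
      by_cases hac : a = c
      · rw [if_pos (by simp [List.isPrefixOf, hac])]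
        rw [ih _ _ _ (by simp at h ⊢; omega)]
        rw [hac]
        have hd : List.drop [c].length (c :: rest) = rest := rfl
        rw [hd, pvCharSplit_cons_self, List.reverse_nil, pvConsHead_nil (pvCharSplit_ne_nil c rest)]
        cases hX : pvCharSplit c rest with
        | nil => exact absurd hX (pvCharSplit_ne_nil c rest)
        | cons q qs => simp [pvConsHead]
      · rw [if_neg (by simp [List.isPrefixOf]; intro hc; exact absurd hc.symm hac)]
        rw [ih _ _ _ (by simp at h ⊢; omega)]
        rw [pvCharSplit_cons_ne c a rest hac, pvConsHead_consHead]
        simp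

theorem pvSplitOn_single (c : Char) (l : List Char) :
    PySem.Chars.splitOn l [c] = pvCharSplit c l := by
  rw [PySem.Chars.splitOn.eq_def, pvGo c (l.length + 1) l [] [] (by omega)]
  simp [pvConsHead_nil (pvCharSplit_ne_nil c l)]

theorem pvMem_charSplit (c : Char) (l : List Char) :
    ∀ p ∈ pvCharSplit c l, c ∉ p := by
  induction l with
  | nil => simp [pvCharSplit]
  | cons a t ih =>
    intro p hp
    by_cases hac : a = c
    · rw [hac, pvCharSplit_cons_self] at hp
      rcases List.mem_cons.mp hp with hp | hp
      · simp [hp]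
      · exact ih p hp
    · rw [pvCharSplit_cons_ne c a t hac] at hp
      cases hX : pvCharSplit c t with
      | nil => exact absurd hX (pvCharSplit_ne_nil c t)
      | cons q qs =>
        rw [hX] at hp
        simp only [pvConsHead] at hp
        rcases List.mem_cons.mp hp with hp | hp
        · subst hp
          intro hmem
          rcases List.mem_append.mp hmem with h1 | h1
          · simp at h1; exact hac h1.symm
          · exact ih q (by rw [hX]; exact List.mem_cons_self) h1
        · exact ih p (by rw [hX]; exact List.mem_cons_of_mem _ hp)

theorem pvCharSplit_of_not_mem (c : Char) (l : List Char) (h : c ∉ l) :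
    pvCharSplit c l = [l] := by
  induction l with
  | nil => simp [pvCharSplit]
  | cons a t ih =>
    simp only [List.mem_cons, not_or] at h
    rw [pvCharSplit_cons_ne c a t (Ne.symm h.1), ih h.2]
    simp [pvConsHead]

-- A's non-comma logic as a function; parseOpAux reduces to it on comma-free input.
def pvHandle (p : List Char) : List (List Char) :=
  if PySem.Chars.find p ['-'] > -1 then
    match PySem.Chars.splitOn p ['-'] with
    | [s, t] =>
      match PySem.Int.ofChars? s, PySem.Int.ofChars? t with
      | some st, some en =>
        (PySem.List.pyRange st (en + 1) 1).foldl (fun ops n => ops ++ [PySem.Int.toChars n]) []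
      | _, _ => []
    | _ => []
  else [p]

theorem pvFind_gt_iff (p : List Char) (c : Char) :
    (PySem.Chars.find p [c] > -1) ↔ c ∈ p := by
  constructor
  · intro h
    exact (List.singleton_infix_iff c p).mp ((PySem.Chars.find_nonneg_iff p [c]).mp (by omega))
  · intro h
    have := (PySem.Chars.find_nonneg_iff p [c]).mpr ((List.singleton_infix_iff c p).mpr h)
    omega

theorem parseOpAux_noComma (f : Nat) (p : List Char) (h : ',' ∉ p) :
    parseOpAux (f + 1) p = pvHandle p := by
  simp only [parseOpAux, pvHandle]
  rw [if_neg (fun hgt => h ((pvFind_gt_iff p ',').mp hgt))]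

theorem pvPartB_eq (ops : List (List Char)) (p : List Char) (hok : pvPartOK p = true) :
    parsePartB ops p = ops ++ pvHandle p := by
  by_cases hin : PySem.Chars.isIn ['-'] p = true
  · have hmem : '-' ∈ p :=
      (List.singleton_infix_iff '-' p).mp ((PySem.Chars.isIn_iff_infix _ _).mp hin)
    have hgt : PySem.Chars.find p ['-'] > -1 := (pvFind_gt_iff p '-').mpr hmem
    unfold pvPartOK at hok
    rw [if_pos hin] at hok
    cases hsp : PySem.Chars.splitOn p ['-'] with
    | nil => rw [hsp] at hok; simp at hok
    | cons s rest =>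
      cases rest with
      | nil => rw [hsp] at hok; simp at hok
      | cons t rest2 =>
        cases rest2 with
        | nil =>
          rw [hsp] at hok
          simp only [Bool.and_eq_true, Option.isSome_iff_exists] at hok
          obtain ⟨⟨st, hs⟩, ⟨en, ht⟩⟩ := hok
          simp only [parsePartB, pvHandle, if_pos hin, if_pos hgt, hsp, hs, ht]
          rw [PySem.List.foldl_append_singleton_eq_map]
          simp
        | cons u rest3 =>
          rw [hsp] at hok; simp at hok
  · have hnmem : '-' ∉ p := fun hmem =>
      hin ((PySem.Chars.isIn_iff_infix _ _).mpr ((List.singleton_infix_iff '-' p).mpr hmem))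
    simp only [parsePartB, pvHandle]
    rw [if_neg hin, if_neg (fun hgt => hnmem ((pvFind_gt_iff p '-').mp hgt))]

-- ===== VERDICT (by name: the statement is the Claim_ definition above) =====
theorem parseOperationExpression_spec : Claim_equal_parseOperationExpression := by
  intro expression _ hPre
  unfold Spec_parseOperationExpression parseOperationExpression parseOperationExpression_alt
  congr 1
  unfold Pre_parseOperationExpression at hPre
  rw [List.all_eq_true] at hPre
  by_cases hc : ',' ∈ expression.toList
  · obtain ⟨a, rest, hL⟩ : ∃ a rest, expression.toList = a :: rest := by
      cases h : expression.toList with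
      | nil => rw [h] at hc; simp at hc
      | cons a rest => exact ⟨a, rest, rfl⟩
    rw [hL] at hc hPre ⊢
    simp only [parseOpAux, List.length_cons]
    rw [if_pos ((pvFind_gt_iff _ ',').mpr hc)]
    apply PySem.List.foldl_congr_mem
    intro ops sub hsub
    have hnc : ',' ∉ sub := by
      rw [pvSplitOn_single] at hsub
      exact pvMem_charSplit ',' _ sub hsub
    show ops ++ parseOpAux (rest.length + 1) sub = parsePartB ops sub
    rw [parseOpAux_noComma rest.length sub hnc, pvPartB_eq ops sub (hPre sub hsub)]
  · rw [parseOpAux_noComma _ _ hc]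
    rw [pvSplitOn_single, pvCharSplit_of_not_mem ',' _ hc] at hPre ⊢
    simp only [List.foldl_cons, List.foldl_nil]
    rw [pvPartB_eq [] _ (hPre _ List.mem_cons_self)]
    simp
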